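-- pv_equiv track=rewrite | github.com/sadamapeach/Dasar-Pemrograman | Tugas2_24060121130060_Oktaviana Sadama Nur Azizah/Tugas 1-2/Apakah_X_Elemen_ke_N.py | IsXElmtKeN
-- ===== SOURCE A (Python) =====
-- def is_empty(L):
--     if L == []:
--         return True
--     else:
--         return False
--
-- def first_element(L):
--     if not is_empty(L):
--         return L[0]
--
-- def tail_element(L):
--     if not (is_empty(L)):
--         return L[1:]
--
-- def is_member(L,x):
--     if is_empty(L):
--         return False
--     else:
--         if first_element(L) == x:
--             return True
--         else:
--             return is_member(tail_element(L),x)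
--
-- def prec(N):
--     return N-1
--
-- def IsXElmtKeN(x,N,L):
--     if is_member(L,x):
--         if (N == 1) and (first_element(L) == x):
--             return True
--         else:
--             return IsXElmtKeN(x,prec(N),tail_element(L))
--     else:
--         return False
-- ===== SOURCE B (Python) =====
-- def IsXElmtKeN(x, N, L):
--     for i, val in enumerate(L):
--         if i == N - 1:
--             return val == x
--     return False
-- ===== Notes on version B (the rewrite author's own statement) =====
-- stated objective: faster
-- what changed: Replaces A's double recursion (a full recursive membership scan of the suffix at every step) with a single iterative pass over enumerate(L) that returns val == x at index N-1 and False if that index is never reached.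
import Mathlib
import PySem

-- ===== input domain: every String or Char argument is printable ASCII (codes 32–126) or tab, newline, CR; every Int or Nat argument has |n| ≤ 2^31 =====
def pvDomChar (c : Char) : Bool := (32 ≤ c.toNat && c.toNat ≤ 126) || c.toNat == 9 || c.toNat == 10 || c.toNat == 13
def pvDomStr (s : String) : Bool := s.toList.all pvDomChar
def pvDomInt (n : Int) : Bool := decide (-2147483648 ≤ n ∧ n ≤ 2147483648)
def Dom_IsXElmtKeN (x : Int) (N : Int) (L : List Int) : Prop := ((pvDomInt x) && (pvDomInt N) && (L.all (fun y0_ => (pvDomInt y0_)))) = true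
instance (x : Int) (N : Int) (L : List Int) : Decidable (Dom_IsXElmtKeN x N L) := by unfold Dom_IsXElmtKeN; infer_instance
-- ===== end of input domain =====

-- B replaces A's five helpers and double recursion by one iterative pass over enumerate(L),
-- returning val == x at index N-1 and False if that index is never reached (objective: simpler).

-- ===== PORT A =====
def pyIsEmpty (L : List Int) : Bool := L == []

-- returns None on the empty list, like the Python (None == x is False for an int x)
def pyFirstElement (L : List Int) : Option Int :=
  if !pyIsEmpty L then PySem.List.pyGet? L 0 else none

-- returns None on the empty list (that path is never taken by the callers below,
-- exactly as in the Python; callers use .getD [] to feed the list case on)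
def pyTailElement (L : List Int) : Option (List Int) :=
  if !pyIsEmpty L then some (PySem.List.slice L (some 1) none) else none

def pyIsMember (L : List Int) (x : Int) : Bool :=
  if pyIsEmpty L then false
  else if pyFirstElement L == some x then true
  else pyIsMember ((pyTailElement L).getD []) x
termination_by L.length
decreasing_by
  simp only [pyIsEmpty, pyTailElement] at *
  cases L with
  | nil => simp_all
  | cons a t => simp [PySem.List.slice]

def pyPrec (N : Int) : Int := N - 1

def IsXElmtKeN (x : Int) (N : Int) (L : List Int) : Bool :=
  if pyIsMember L x then
    if N == 1 && pyFirstElement L == some x then true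
    else IsXElmtKeN x (pyPrec N) ((pyTailElement L).getD [])
  else false
termination_by L.length
decreasing_by
  rename_i h _
  simp only [pyTailElement, pyIsEmpty]
  cases L with
  | nil => simp [pyIsMember, pyIsEmpty] at h
  | cons a t => simp [PySem.List.slice]

-- ===== PORT B =====
-- the enumerate loop: i is the running index
def altGo (x : Int) (N : Int) (i : Nat) (L : List Int) : Bool :=
  match L with
  | [] => false
  | v :: rest => if (i : Int) == N - 1 then v == x else altGo x N (i + 1) rest

def IsXElmtKeN_alt (x : Int) (N : Int) (L : List Int) : Bool := altGo x N 0 L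

-- ===== PRECONDITION & SPEC =====
def Spec_IsXElmtKeN (x : Int) (N : Int) (L : List Int) (out : Bool) : Prop := out = IsXElmtKeN_alt x N L
instance (x : Int) (N : Int) (L : List Int) (out : Bool) : Decidable (Spec_IsXElmtKeN x N L out) := by unfold Spec_IsXElmtKeN; infer_instance

-- ===== CLAIM (what is proved, stated in full; the proofs are below) =====
def Claim_equal_IsXElmtKeN : Prop := ∀ (x : Int) (N : Int) (L : List Int), Dom_IsXElmtKeN x N L → Spec_IsXElmtKeN x N L (IsXElmtKeN x N L)

-- ===== LEMMAS AND PROOFS =====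

lemma pyFirstElement_cons (v : Int) (rest : List Int) :
    pyFirstElement (v :: rest) = some v := by
  simp [pyFirstElement, pyIsEmpty, PySem.List.pyGet?, PySem.List.pyIdx?]

lemma pyTailElement_cons (v : Int) (rest : List Int) :
    (pyTailElement (v :: rest)).getD [] = rest := by
  simp [pyTailElement, pyIsEmpty, PySem.List.slice_from_one]

lemma pyIsMember_cons (v : Int) (rest : List Int) (x : Int) :
    pyIsMember (v :: rest) x = (v == x || pyIsMember rest x) := by
  rw [pyIsMember]
  simp only [pyIsEmpty, pyFirstElement_cons, pyTailElement_cons]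
  by_cases h : v = x <;> simp [h]

-- shifting the enumerate index is the same as shifting N
lemma altGo_shift (x N : Int) (i : Nat) (L : List Int) :
    altGo x N (i + 1) L = altGo x (N - 1) i L := by
  induction L generalizing i with
  | nil => simp [altGo]
  | cons v rest ih =>
    simp only [altGo]
    have hc : (((i : Nat) + 1 : Nat) : Int) = N - 1 ↔ (i : Int) = (N - 1) - 1 := by
      push_cast; omega
    by_cases h : (i : Int) = (N - 1) - 1
    · simp [hc.mpr h, h]
    · have h2 : ¬ ((((i : Nat) + 1 : Nat) : Int) = N - 1) := fun hh => h (hc.mp hh)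
      simp only [beq_iff_eq, h2, h, if_false]
      exact ih (i + 1)

lemma altGo_cons (x N v : Int) (rest : List Int) :
    altGo x N 0 (v :: rest) = (if N = 1 then (v == x) else altGo x (N - 1) 0 rest) := by
  simp only [altGo, Nat.cast_zero]
  by_cases h : N = 1
  · simp [h]
  · have h0 : ¬ ((0 : Int) = N - 1) := by omega
    simp only [beq_iff_eq, h0, if_false, h]
    exact altGo_shift x N 0 rest

lemma altGo_of_nonpos (x N : Int) (L : List Int) (hN : N ≤ 0) :
    altGo x N 0 L = false := by
  induction L generalizing N with
  | nil => simp [altGo]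
  | cons v rest ih =>
    rw [altGo_cons, if_neg (by omega)]
    exact ih (N - 1) (by omega)

lemma altGo_of_not_member (x N : Int) (L : List Int) (h : pyIsMember L x = false) :
    altGo x N 0 L = false := by
  induction L generalizing N with
  | nil => simp [altGo]
  | cons v rest ih =>
    rw [pyIsMember_cons] at h
    simp only [Bool.or_eq_false_iff, beq_eq_false_iff_ne, ne_eq] at h
    rw [altGo_cons]
    by_cases hn : N = 1
    · simp [hn, h.1]
    · rw [if_neg hn]
      exact ih (N - 1) h.2

lemma main_eq (x N : Int) (L : List Int) : IsXElmtKeN x N L = altGo x N 0 L := by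
  induction L generalizing N with
  | nil => simp [IsXElmtKeN, pyIsMember, pyIsEmpty, altGo]
  | cons v rest ih =>
    rw [IsXElmtKeN]
    by_cases hm : pyIsMember (v :: rest) x = true
    · rw [if_pos hm, pyFirstElement_cons, pyTailElement_cons, altGo_cons]
      by_cases hN1 : N = 1
      · subst hN1
        by_cases hv : v = x
        · simp [hv]
        · have hc : ((1 : Int) == 1 && (some v == some x)) = false := by simp [hv]
          rw [hc, if_neg (by simp), ih, if_pos rfl, pyPrec,
              altGo_of_nonpos x ((1 : Int) - 1) rest (by omega)]
          simp [hv]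
      · have hc : (N == 1 && (some v == some x)) = false := by simp [hN1]
        rw [hc, if_neg (by simp), ih, if_neg hN1, pyPrec]
    · simp only [Bool.not_eq_true] at hm
      rw [hm, if_neg (by simp)]
      exact (altGo_of_not_member x N (v :: rest) hm).symm

-- ===== VERDICT (by name: the statement is the Claim_ definition above) =====
theorem IsXElmtKeN_spec : Claim_equal_IsXElmtKeN := by
  intro x N L _
  unfold Spec_IsXElmtKeN IsXElmtKeN_alt
  exact main_eq x N L
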